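-- pv_equiv track=rewrite | github.com/haesung-j/Algorithms | Programmers/모의고사.py | solution
-- ===== SOURCE A (Python) =====
-- first = [1,2,3,4,5]
--
-- second = [2, 1, 2, 3, 2, 4, 2, 5]
--
-- third = [3, 3, 1, 1, 2, 2, 4, 4, 5, 5]
--
-- def solution(answers):
--     # 정답 count
--     f_cnt, s_cnt, t_cnt = 0, 0, 0
--     for i,a in enumerate(answers):
--         if first[i%len(first)] == a:
--             f_cnt += 1
--         if second[i%len(second)] == a:
--             s_cnt += 1
--         if third[i%len(third)] == a:
--             t_cnt += 1
--     cnt = [f_cnt, s_cnt, t_cnt]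
--
--
--     # 높은 점수 사람 반환
--     # 동점일 경우 오름차순
--     max_score = max(cnt)
--
--     answer = []
--     for i in range(3):
--         if cnt[i] == max_score:
--             answer.append(i+1)
--
--     return answer
-- ===== SOURCE B (Python) =====
-- first = [1, 2, 3, 4, 5]
--
-- second = [2, 1, 2, 3, 2, 4, 2, 5]
--
-- third = [3, 3, 1, 1, 2, 2, 4, 4, 5, 5]
--
--
-- def solution(answers):
--     # One pass builds an index: tally[(i % 40, a)] = how often answer a occurs at
--     # positions congruent to i mod 40 (40 = lcm of the three pattern lengths).
--     # Each score is then read off the index with 40 lookups, no per-pattern scan.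
--     tally = {}
--     for i, a in enumerate(answers):
--         k = (i % 40, a)
--         tally[k] = tally.get(k, 0) + 1
--     scores = [sum(tally.get((r, p[r % len(p)]), 0) for r in range(40))
--               for p in (first, second, third)]
--     m = max(scores)
--     return [i + 1 for i in range(3) if scores[i] == m]
-- ===== Notes on version B (the rewrite author's own statement) =====
-- stated objective: alternative
-- what changed: A checks all three patterns against every element inside one combined loop with three counters; B builds a tally dict keyed by (index mod 40, answer) in a single pass (40 = lcm of the pattern lengths) and then computes each pattern's score as 40 dict lookups, so the per-element pattern comparisons disappear.
import Mathlib
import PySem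

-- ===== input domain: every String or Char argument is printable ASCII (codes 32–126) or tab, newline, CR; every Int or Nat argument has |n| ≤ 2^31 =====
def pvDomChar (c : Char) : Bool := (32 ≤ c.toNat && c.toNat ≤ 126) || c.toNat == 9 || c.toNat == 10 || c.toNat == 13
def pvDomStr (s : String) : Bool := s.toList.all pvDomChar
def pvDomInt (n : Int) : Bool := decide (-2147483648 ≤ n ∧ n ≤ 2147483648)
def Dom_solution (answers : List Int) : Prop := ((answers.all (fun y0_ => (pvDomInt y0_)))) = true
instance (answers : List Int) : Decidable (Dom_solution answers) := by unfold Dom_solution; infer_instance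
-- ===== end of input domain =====

-- B replaces A's combined per-element triple pattern check by one tally dict keyed by
-- (i % 40, answer) built in a single pass; each score is then 40 dict lookups (alternative decomposition).

-- module constants shared by both versions
def firstPat : List Int := [1, 2, 3, 4, 5]
def secondPat : List Int := [2, 1, 2, 3, 2, 4, 2, 5]
def thirdPat : List Int := [3, 3, 1, 1, 2, 2, 4, 4, 5, 5]

-- ===== PORT A =====
def solution (answers : List Int) : List Int :=
  let cnts := (PySem.List.enumerate answers 0).foldl
    (fun (acc : Int × Int × Int) (p : Int × Int) =>
      let f := if PySem.List.pyGetD firstPat (PySem.Int.mod p.1 (firstPat.length : Int)) 0 = p.2 then acc.1 + 1 else acc.1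
      let s := if PySem.List.pyGetD secondPat (PySem.Int.mod p.1 (secondPat.length : Int)) 0 = p.2 then acc.2.1 + 1 else acc.2.1
      let t := if PySem.List.pyGetD thirdPat (PySem.Int.mod p.1 (thirdPat.length : Int)) 0 = p.2 then acc.2.2 + 1 else acc.2.2
      (f, s, t)) (0, 0, 0)
  let cnt : List Int := [cnts.1, cnts.2.1, cnts.2.2]
  let maxScore := (PySem.List.max? cnt (fun y => y)).getD 0   -- cnt is a nonempty literal, max? is some
  (List.range 3).foldl
    (fun acc i => if cnt.getD i 0 = maxScore then acc ++ [(i : Int) + 1] else acc) []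

-- ===== PORT B =====
def solution_alt (answers : List Int) : List Int :=
  -- one pass building tally[(i % 40, a)] = multiplicity
  let tally := (PySem.List.enumerate answers 0).foldl
    (fun (d : PySem.Dict (Int × Int) Int) (q : Int × Int) =>
      let k := (PySem.Int.mod q.1 40, q.2)
      d.insert k (d.getD k 0 + 1)) PySem.Dict.empty
  -- each score read off the tally with 40 lookups
  let scores := [firstPat, secondPat, thirdPat].map (fun p =>
    ((PySem.List.pyRange 0 40 1).map (fun r =>
      tally.getD (r, PySem.List.pyGetD p (PySem.Int.mod r (p.length : Int)) 0) 0)).sum)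
  let m := (PySem.List.max? scores (fun y => y)).getD 0   -- scores is nonempty, max? is some
  ((List.range 3).filter (fun i => scores.getD i 0 = m)).map (fun i => (i : Int) + 1)

-- ===== PRECONDITION & SPEC =====
def Spec_solution (answers : List Int) (out : List Int) : Prop := out = solution_alt answers
instance (answers : List Int) (out : List Int) : Decidable (Spec_solution answers out) := by unfold Spec_solution; infer_instance

-- ===== CLAIM (what is proved, stated in full; the proofs are below) =====
def Claim_equal_solution : Prop := ∀ (answers : List Int), Dom_solution answers → Spec_solution answers (solution answers)

-- ===== LEMMAS AND PROOFS =====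

-- the pattern value B looks up for residue r
def pKey (p : List Int) (r : Int) : Int :=
  PySem.List.pyGetD p (PySem.Int.mod r (p.length : Int)) 0

-- the keys B tallies, starting the index at s
def keysFrom (l : List Int) (s : Int) : List (Int × Int) :=
  (PySem.List.enumerate l s).map (fun q => (PySem.Int.mod q.1 40, q.2))

-- direct per-pattern match count starting the index at s
def cntF (p : List Int) (l : List Int) (s : Int) : Int :=
  ((PySem.List.enumerate l s).map
    (fun q => if PySem.List.pyGetD p (PySem.Int.mod q.1 (p.length : Int)) 0 = q.2 then (1 : Int) else 0)).sum

-- A's single combined loop computes, in each component, the direct per-pattern count.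
theorem loop_eq (l : List Int) (s f0 s0 t0 : Int) :
    (PySem.List.enumerate l s).foldl
      (fun (acc : Int × Int × Int) (p : Int × Int) =>
        let f := if PySem.List.pyGetD firstPat (PySem.Int.mod p.1 (firstPat.length : Int)) 0 = p.2 then acc.1 + 1 else acc.1
        let s := if PySem.List.pyGetD secondPat (PySem.Int.mod p.1 (secondPat.length : Int)) 0 = p.2 then acc.2.1 + 1 else acc.2.1
        let t := if PySem.List.pyGetD thirdPat (PySem.Int.mod p.1 (thirdPat.length : Int)) 0 = p.2 then acc.2.2 + 1 else acc.2.2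
        (f, s, t)) (f0, s0, t0)
    = (f0 + cntF firstPat l s, s0 + cntF secondPat l s, t0 + cntF thirdPat l s) := by
  induction l generalizing s f0 s0 t0 with
  | nil => simp [cntF, PySem.List.enumerate_nil]
  | cons x xs ih =>
      simp only [cntF, PySem.List.enumerate_cons, List.foldl_cons, List.map_cons, List.sum_cons]
      rw [ih]
      simp only [cntF]
      split_ifs <;> rw [Prod.mk.injEq, Prod.mk.injEq] <;> refine ⟨by ring, by ring, by ring⟩

-- the 0/1 sum over range(40) of "this residue-key equals (m, x)" is the single indicator at residue m
theorem ind_sum (p : List Int) (m x : Int) (hm : 0 ≤ m) (hm40 : m < 40) :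
    ((PySem.List.pyRange 0 40 1).map
      (fun r => if ((r : Int), pKey p r) = (m, x) then (1 : Int) else 0)).sum
    = if pKey p m = x then 1 else 0 := by
  rw [PySem.List.pyRange_one_append 0 m 40 hm (by omega),
      PySem.List.pyRange_one_cons hm40]
  rw [List.map_append, List.sum_append, List.map_cons, List.sum_cons]
  have h1 : ((PySem.List.pyRange 0 m 1).map
      (fun r => if ((r : Int), pKey p r) = (m, x) then (1 : Int) else 0)).sum = 0 := by
    apply List.sum_eq_zero
    intro y hy
    obtain ⟨r, hr, rfl⟩ := List.mem_map.mp hy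
    have := (PySem.List.mem_pyRange_one).mp hr
    rw [if_neg]
    simp only [Prod.mk.injEq, not_and]
    intro h; omega
  have h2 : ((PySem.List.pyRange (m + 1) 40 1).map
      (fun r => if ((r : Int), pKey p r) = (m, x) then (1 : Int) else 0)).sum = 0 := by
    apply List.sum_eq_zero
    intro y hy
    obtain ⟨r, hr, rfl⟩ := List.mem_map.mp hy
    have := (PySem.List.mem_pyRange_one).mp hr
    rw [if_neg]
    simp only [Prod.mk.injEq, not_and]
    intro h; omega
  rw [h1, h2]
  simp [Prod.mk.injEq]

-- counting the tallied keys residue-by-residue recovers the direct per-pattern count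
theorem sumCount (p : List Int) (hdvd : (p.length : Int) ∣ 40) (hlen : 0 < (p.length : Int))
    (l : List Int) : ∀ (s : Int), 0 ≤ s →
    ((PySem.List.pyRange 0 40 1).map
      (fun r => ((keysFrom l s).count (r, pKey p r) : Int))).sum = cntF p l s := by
  induction l with
  | nil =>
      intro s hs
      simp [keysFrom, cntF, PySem.List.enumerate_nil, List.sum_eq_zero]
  | cons x xs ih =>
      intro s hs
      have hk : keysFrom (x :: xs) s = (PySem.Int.mod s 40, x) :: keysFrom xs (s + 1) := by
        simp [keysFrom, PySem.List.enumerate_cons]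
      have hcnt : cntF p (x :: xs) s
          = (if PySem.List.pyGetD p (PySem.Int.mod s (p.length : Int)) 0 = x then (1 : Int) else 0)
            + cntF p xs (s + 1) := by
        simp [cntF, PySem.List.enumerate_cons]
      rw [hk, hcnt]
      have hsplit : ∀ r : Int, (((PySem.Int.mod s 40, x) :: keysFrom xs (s + 1)).count (r, pKey p r) : Int)
          = ((keysFrom xs (s + 1)).count (r, pKey p r) : Int)
            + (if ((r : Int), pKey p r) = (PySem.Int.mod s 40, x) then (1 : Int) else 0) := by
        intro r
        rw [List.count_cons]
        push_cast
        congr 1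
        simp only [beq_iff_eq, Prod.mk.injEq]
        split_ifs with h1 h2 <;> simp_all [eq_comm]
      simp only [hsplit]
      rw [PySem.List.sum_map_add_int]
      rw [ih (s + 1) (by omega)]
      have hm0 : 0 ≤ PySem.Int.mod s 40 := PySem.Int.mod_nonneg s (by norm_num)
      have hm40 : PySem.Int.mod s 40 < 40 := PySem.Int.mod_lt s (by norm_num)
      rw [ind_sum p _ x hm0 hm40]
      have hkey : pKey p (PySem.Int.mod s 40) = PySem.List.pyGetD p (PySem.Int.mod s (p.length : Int)) 0 := by
        unfold pKey
        congr 1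
        rw [PySem.Int.mod_eq_emod_of_pos (by norm_num : (0:Int) < 40),
            PySem.Int.mod_eq_emod_of_pos hlen, PySem.Int.mod_eq_emod_of_pos hlen]
        exact Int.emod_emod_of_dvd s hdvd
      rw [hkey]
      ring

-- B's tally lookups are counts of the tallied keys
theorem tally_getD (l : List Int) (k : Int × Int) :
    ((PySem.List.enumerate l 0).foldl
      (fun (d : PySem.Dict (Int × Int) Int) (q : Int × Int) =>
        let kk := (PySem.Int.mod q.1 40, q.2)
        d.insert kk (d.getD kk 0 + 1)) PySem.Dict.empty).getD k 0
    = ((keysFrom l 0).count k : Int) := by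
  have h : (PySem.List.enumerate l 0).foldl
      (fun (d : PySem.Dict (Int × Int) Int) (q : Int × Int) =>
        let kk := (PySem.Int.mod q.1 40, q.2)
        d.insert kk (d.getD kk 0 + 1)) PySem.Dict.empty
      = (keysFrom l 0).foldl (fun d kk => d.insert kk (d.getD kk 0 + 1)) PySem.Dict.empty := by
    rw [keysFrom, List.foldl_map]
  rw [h, PySem.Dict.getD_foldl_insert_add_one]
  simp [PySem.Dict.getD_empty]

-- the common final phase: select-the-max over a 3-element score list, foldl-append (A) vs filter-map (B)
theorem tail_eq (f s t m : Int) :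
    (List.range 3).foldl
      (fun acc i => if ([f, s, t].getD i 0) = m then acc ++ [(i : Int) + 1] else acc) []
    = ((List.range 3).filter (fun i => ([f, s, t].getD i 0) = m)).map (fun i => (i : Int) + 1) := by
  simp only [List.range_succ, List.range_zero, List.nil_append, List.cons_append,
    List.foldl_cons, List.foldl_nil, List.filter_cons, List.filter_nil, List.getD,
    List.getElem?_cons_zero, List.getElem?_cons_succ, Option.getD_some]
  split_ifs <;> simp_all

-- B's score list equals A's count triple, as a list
theorem scores_eq (l : List Int) :
    [firstPat, secondPat, thirdPat].map (fun p =>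
      ((PySem.List.pyRange 0 40 1).map (fun r =>
        (((PySem.List.enumerate l 0).foldl
          (fun (d : PySem.Dict (Int × Int) Int) (q : Int × Int) =>
            let kk := (PySem.Int.mod q.1 40, q.2)
            d.insert kk (d.getD kk 0 + 1)) PySem.Dict.empty).getD
          (r, PySem.List.pyGetD p (PySem.Int.mod r (p.length : Int)) 0) 0))).sum)
    = [cntF firstPat l 0, cntF secondPat l 0, cntF thirdPat l 0] := by
  simp only [List.map_cons, List.map_nil]
  have step : ∀ p : List Int, (p.length : Int) ∣ 40 → 0 < (p.length : Int) →
      ((PySem.List.pyRange 0 40 1).map (fun r =>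
        (((PySem.List.enumerate l 0).foldl
          (fun (d : PySem.Dict (Int × Int) Int) (q : Int × Int) =>
            let kk := (PySem.Int.mod q.1 40, q.2)
            d.insert kk (d.getD kk 0 + 1)) PySem.Dict.empty).getD
          (r, PySem.List.pyGetD p (PySem.Int.mod r (p.length : Int)) 0) 0))).sum
      = cntF p l 0 := by
    intro p hdvd hlen
    have : ∀ r : Int, ((PySem.List.enumerate l 0).foldl
          (fun (d : PySem.Dict (Int × Int) Int) (q : Int × Int) =>
            let kk := (PySem.Int.mod q.1 40, q.2)
            d.insert kk (d.getD kk 0 + 1)) PySem.Dict.empty).getD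
          (r, PySem.List.pyGetD p (PySem.Int.mod r (p.length : Int)) 0) 0
        = ((keysFrom l 0).count (r, pKey p r) : Int) := fun r => tally_getD l _
    simp only [this]
    exact sumCount p hdvd hlen l 0 le_rfl
  rw [step firstPat (by decide) (by decide), step secondPat (by decide) (by decide),
      step thirdPat (by decide) (by decide)]

-- ===== VERDICT (by name: the statement is the Claim_ definition above) =====
theorem solution_spec : Claim_equal_solution := by
  intro answers _
  unfold Spec_solution
  simp only [solution, solution_alt, loop_eq, zero_add]
  rw [scores_eq]
  exact tail_eq _ _ _ _
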